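-- pv_equiv track=rewrite | github.com/Saurabh022mishra/Hacker_Rank_Python | String_split_and_join.py | split_and_join
-- ===== SOURCE A (Python) =====
-- def split_and_join(line):
--     w=[]
--     a=0
--     for i in line:
--         w.append(i)
--     for i in w:
--         a=a+1
--         if(i==" "):
--             w[a-1]="-"
--     return ''.join(w)
-- ===== SOURCE B (Python) =====
-- def split_and_join(line):
--     return '-'.join(line.split(" "))
-- ===== Notes on version B (the rewrite author's own statement) =====
-- stated objective: idiomatic
-- what changed: Replaces the two explicit loops (copying characters one by one, then an index-counter pass overwriting spaces) with a split on a single-space separator followed by a dash join, threading a token list instead of scanning characters.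
import Mathlib
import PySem

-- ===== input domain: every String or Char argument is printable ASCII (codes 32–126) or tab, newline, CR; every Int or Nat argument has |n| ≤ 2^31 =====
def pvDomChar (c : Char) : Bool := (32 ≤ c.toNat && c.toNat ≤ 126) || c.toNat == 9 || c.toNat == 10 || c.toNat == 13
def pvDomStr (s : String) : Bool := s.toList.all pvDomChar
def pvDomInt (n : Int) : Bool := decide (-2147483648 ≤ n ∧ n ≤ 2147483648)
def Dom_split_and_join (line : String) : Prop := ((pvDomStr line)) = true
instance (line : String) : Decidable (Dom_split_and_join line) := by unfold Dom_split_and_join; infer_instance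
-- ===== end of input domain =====

-- B replaces A's two explicit loops with split(" ") + '-'.join (idiomatic token-list decomposition).


-- ===== PORT A =====
-- second loop: 'for i in w: a += 1; if i == " ": w[a-1] = "-"' — iterates the live
-- list by index (a is the current position before increment); fuel = w.length
def splitJoinLoop2 : Nat → List Char → Nat → List Char
  | 0, w, _ => w
  | fuel + 1, w, a =>
    match PySem.List.pyGet? w (a : Int) with
    | none => w
    | some i =>
      let a' := a + 1
      let w' := if i = ' ' then w.set (a' - 1) '-' else w
      splitJoinLoop2 fuel w' a'

def split_and_join (line : String) : String :=
  -- w=[]; for i in line: w.append(i)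
  let w := line.toList.foldl (fun w i => w ++ [i]) []
  let w2 := splitJoinLoop2 w.length w 0
  -- ''.join(w) — the elements are single characters
  String.ofList (PySem.Chars.join [] (w2.map (fun c => [c])))

-- ===== PORT B =====
def split_and_join_alt (line : String) : String :=
  PySem.Str.join "-" ((PySem.Str.split? line " ").getD [])

-- ===== PRECONDITION & SPEC =====
def Spec_split_and_join (line : String) (out : String) : Prop := out = split_and_join_alt line
instance (line : String) (out : String) : Decidable (Spec_split_and_join line out) := by unfold Spec_split_and_join; infer_instance

-- ===== CLAIM (what is proved, stated in full; the proofs are below) =====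
def Claim_equal_split_and_join : Prop := ∀ (line : String), Dom_split_and_join line → Spec_split_and_join line (split_and_join line)

-- ===== LEMMAS AND PROOFS =====

theorem foldl_append_id (xs acc : List Char) :
    xs.foldl (fun w i => w ++ [i]) acc = acc ++ xs := by
  induction xs generalizing acc with
  | nil => simp
  | cons x xs ih => simp [List.foldl, ih]

/-- the character substitution both programs perform -/
def pvSub (c : Char) : Char := if c = ' ' then '-' else c

theorem splitJoinLoop2_spec (fuel : Nat) :
    ∀ (w : List Char) (a : Nat), a + fuel = w.length →
      splitJoinLoop2 fuel w a = w.take a ++ (w.drop a).map pvSub := by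
  induction fuel with
  | zero =>
    intro w a h
    simp [splitJoinLoop2, List.drop_eq_nil_of_le (show w.length ≤ a by omega),
      List.take_of_length_le (show w.length ≤ a by omega)]
  | succ n ih =>
    intro w a h
    have ha : a < w.length := by omega
    have hget : PySem.List.pyGet? w (a : Int) = some w[a] := by
      rw [PySem.List.pyGet?_natCast, List.getElem?_eq_getElem ha]
    have step : splitJoinLoop2 (n + 1) w a =
        splitJoinLoop2 n (if w[a] = ' ' then w.set a '-' else w) (a + 1) := by
      simp [splitJoinLoop2, hget]
    have hdrop : w.drop a = w[a] :: w.drop (a + 1) := List.drop_eq_getElem_cons ha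
    by_cases hsp : w[a] = ' '
    · rw [step, if_pos hsp, ih (w.set a '-') (a + 1) (by simp; omega)]
      have h1 : (w.set a '-')[a]? = some '-' := List.getElem?_set_self (by simpa using ha)
      have h2 : List.drop (a + 1) (w.set a '-') = List.drop (a + 1) w := by
        rw [List.drop_set_of_lt (by omega)]
      rw [List.take_add_one, List.take_set, h1, h2, hdrop,
        List.set_eq_of_length_le (by simp [List.length_take])]
      simp only [Option.toList_some, List.map_cons, List.append_assoc, List.singleton_append,
        pvSub, if_pos hsp]
    · rw [step, if_neg hsp, ih w (a + 1) (by omega)]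
      have h3 : w[a]? = some w[a] := List.getElem?_eq_getElem ha
      rw [List.take_add_one, h3, hdrop]
      simp only [Option.toList_some, List.map_cons, List.append_assoc, List.singleton_append,
        pvSub, if_neg hsp]

theorem join_snoc_append (sep : List Char) (a t : List Char) :
    ∀ (xs : List (List Char)),
      PySem.Chars.join sep (xs ++ [a ++ t]) = PySem.Chars.join sep (xs ++ [a]) ++ t := by
  intro xs
  induction xs with
  | nil => simp [PySem.Chars.join_singleton]
  | cons x xs ih =>
    rcases xs with _ | ⟨y, ys⟩
    · simp [PySem.Chars.join_cons_cons, PySem.Chars.join_singleton]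
    · simp only [List.cons_append] at *
      rw [PySem.Chars.join_cons_cons, PySem.Chars.join_cons_cons, ih]
      simp

theorem join_snoc_new (sep : List Char) (a b : List Char) :
    ∀ (xs : List (List Char)),
      PySem.Chars.join sep (xs ++ [a, b]) = PySem.Chars.join sep (xs ++ [a]) ++ sep ++ b := by
  intro xs
  induction xs with
  | nil => simp [PySem.Chars.join_cons_cons, PySem.Chars.join_singleton]
  | cons x xs ih =>
    rcases xs with _ | ⟨y, ys⟩
    · simp [PySem.Chars.join_cons_cons, PySem.Chars.join_singleton]
    · simp only [List.cons_append] at *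
      rw [PySem.Chars.join_cons_cons, PySem.Chars.join_cons_cons, ih]
      simp

theorem go_join (fuel : Nat) :
    ∀ (l cur : List Char) (acc : List (List Char)), l.length < fuel →
      PySem.Chars.join ['-'] (PySem.Chars.splitOn.go [' '] fuel l cur acc) =
        PySem.Chars.join ['-'] ((cur.reverse :: acc).reverse) ++ l.map pvSub := by
  induction fuel with
  | zero => intro l cur acc h; omega
  | succ n ih =>
    intro l cur acc h
    rcases l with _ | ⟨c, rest⟩
    · simp [PySem.Chars.splitOn.go]
    · by_cases hc : c = ' '
      · have hpre : [' '].isPrefixOf (c :: rest) = true := by simp [hc, List.isPrefixOf]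
        rw [show PySem.Chars.splitOn.go [' '] (n + 1) (c :: rest) cur acc =
              PySem.Chars.splitOn.go [' '] n (List.drop [' '].length (c :: rest)) [] (cur.reverse :: acc) by
            simp [PySem.Chars.splitOn.go, hpre]]
        simp only [List.length_singleton, List.drop_one, List.tail_cons]
        rw [ih rest [] (cur.reverse :: acc) (by simp at h ⊢; omega)]
        simp only [List.reverse_cons, List.reverse_nil]
        rw [show acc.reverse ++ [cur.reverse] ++ [([] : List Char)] = acc.reverse ++ [cur.reverse, ([] : List Char)] by simp]
        rw [join_snoc_new ['-'] cur.reverse [] acc.reverse]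
        simp [pvSub, hc]
      · have hpre : [' '].isPrefixOf (c :: rest) = false := by
          simp [List.isPrefixOf]; intro h'; exact hc h'.symm
        rw [show PySem.Chars.splitOn.go [' '] (n + 1) (c :: rest) cur acc =
              PySem.Chars.splitOn.go [' '] n rest (c :: cur) acc by
            simp [PySem.Chars.splitOn.go, hpre]]
        rw [ih rest (c :: cur) acc (by simp at h ⊢; omega)]
        simp only [List.reverse_cons]
        rw [join_snoc_append ['-'] cur.reverse [c] acc.reverse]
        simp [pvSub, hc]

theorem join_splitOn_space (cs : List Char) :
    PySem.Chars.join ['-'] (PySem.Chars.splitOn cs [' ']) = cs.map pvSub := by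
  unfold PySem.Chars.splitOn
  rw [go_join (cs.length + 1) cs [] [] (by omega)]
  simp [PySem.Chars.join_singleton]

-- ===== VERDICT (by name: the statement is the Claim_ definition above) =====
theorem split_and_join_spec : Claim_equal_split_and_join := by
  intro line _
  unfold Spec_split_and_join split_and_join split_and_join_alt
  apply String.toList_inj.mp
  have hsplit : PySem.Str.split? line " " =
      some ((PySem.Chars.splitOn line.toList [' ']).map String.ofList) := by
    simp [PySem.Str.split?, PySem.Chars.split?]
  rw [hsplit]
  simp only [Option.getD_some]
  rw [PySem.Str.toList_join]
  rw [foldl_append_id line.toList []]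
  simp only [List.nil_append]
  rw [splitJoinLoop2_spec line.toList.length line.toList 0 (by simp)]
  simp only [List.take_zero, List.drop_zero, List.nil_append]
  rw [PySem.Chars.join_nil_singletons]
  rw [show String.toList "-" = ['-'] from rfl, List.map_map]
  have : List.map (String.toList ∘ String.ofList) (PySem.Chars.splitOn line.toList [' ']) =
      PySem.Chars.splitOn line.toList [' '] := by simp [Function.comp_def]
  rw [this, join_splitOn_space]
  simp
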